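-- pv_equiv track=rewrite | github.com/roccoren/azure-bfl-comparison | src/azure_bfl_compare/tasks/outfit_transfer.py | _parse_gpt_clothing_response
-- ===== SOURCE A (Python) =====
-- from typing import Dict, List, Optional, Sequence, Tuple
--
-- def _parse_gpt_clothing_response(content: str) -> Optional[Dict[str, str]]:
--     result = {
--         "clothing_type": "",
--         "description": "",
--         "fine_details": "",
--         "style": "",
--     }
--
--     for line in content.splitlines():
--         line = line.strip()
--         if line.startswith("CLOTHING_TYPE:"):
--             value = line.split(":", 1)[1].strip().lower()
--             if "shoe" in value or "boot" in value:
--                 result["clothing_type"] = "shoes"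
--             elif "pant" in value or "trouser" in value or "skirt" in value:
--                 result["clothing_type"] = "lower"
--             else:
--                 result["clothing_type"] = "upper"
--         elif line.startswith("DESCRIPTION:"):
--             result["description"] = line.split(":", 1)[1].strip()
--         elif line.startswith("FINE_DETAILS:"):
--             result["fine_details"] = line.split(":", 1)[1].strip()
--         elif line.startswith("STYLE:"):
--             result["style"] = line.split(":", 1)[1].strip().lower()
--
--     if not result["description"]:
--         return None
--     if not result["clothing_type"]:
--         result["clothing_type"] = "upper"
--     if result["style"] not in {"casual", "formal", "athletic", "traditional", "vintage", "modern", "bohemian"}: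
--         result["style"] = ""
--     return result
-- ===== SOURCE B (Python) =====
-- def _parse_gpt_clothing_response(content):
--     # Phase 1: generic field map — last occurrence of a key wins.
--     raw = {}
--     for line in content.splitlines():
--         line = line.strip()
--         if ":" in line:
--             key, value = line.split(":", 1)
--             raw[key] = value.strip()
--
--     # Phase 2: interpret the known fields.
--     description = raw.get("DESCRIPTION", "")
--     if not description:
--         return None
--
--     ct = raw.get("CLOTHING_TYPE")
--     if ct is None:
--         clothing_type = "upper"
--     else:
--         v = ct.lower()
--         if "shoe" in v or "boot" in v:
--             clothing_type = "shoes"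
--         elif "pant" in v or "trouser" in v or "skirt" in v:
--             clothing_type = "lower"
--         else:
--             clothing_type = "upper"
--
--     style = raw.get("STYLE", "").lower()
--     if style not in {"casual", "formal", "athletic", "traditional", "vintage", "modern", "bohemian"}:
--         style = ""
--
--     return {
--         "clothing_type": clothing_type,
--         "description": description,
--         "fine_details": raw.get("FINE_DETAILS", ""),
--         "style": style,
--     }
-- ===== Notes on version B (the rewrite author's own statement) =====
-- stated objective: alternative
-- what changed: B replaces A's single loop of four hard-wired prefix branches by a two-phase decomposition: a generic pass that turns every colon-containing line into a raw key->value map (last occurrence wins), followed by a separate interpretation step that reads the four known keys, classifies the clothing type, lowercases the style and applies the post-checks.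
import Mathlib
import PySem

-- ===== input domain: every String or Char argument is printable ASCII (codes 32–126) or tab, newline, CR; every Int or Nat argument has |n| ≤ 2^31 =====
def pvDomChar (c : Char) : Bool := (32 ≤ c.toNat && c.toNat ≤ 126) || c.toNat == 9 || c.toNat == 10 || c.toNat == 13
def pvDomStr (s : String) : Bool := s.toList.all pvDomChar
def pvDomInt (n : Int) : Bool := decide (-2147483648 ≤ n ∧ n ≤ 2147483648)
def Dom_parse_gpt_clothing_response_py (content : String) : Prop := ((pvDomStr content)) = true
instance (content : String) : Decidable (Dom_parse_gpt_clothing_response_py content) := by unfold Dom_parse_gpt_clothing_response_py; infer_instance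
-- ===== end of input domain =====

-- B parses generically (colon-split field map first, interpretation second) where A matches four
-- hard-wired prefixes inside the loop; proved to return the same value on every input (alternative decomposition).

-- ===== PORT A =====
-- line.split(":", 1)[1] — in A this is only evaluated on lines that start with "<KEY>:", so index 1 exists; getD totalizes
def pvSplitVal (line : String) : String :=
  ((PySem.Str.splitMax? line ":" 1).getD []).getD 1 ""

-- the body of A's `for line in content.splitlines()` loop (result dict is threaded through)
def pvStepA (result : PySem.Dict String String) (rawLine : String) : PySem.Dict String String :=
  let line := PySem.Str.strip rawLine
  if PySem.Str.startswith line "CLOTHING_TYPE:" then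
    let value := PySem.Str.lower (PySem.Str.strip (pvSplitVal line))
    if PySem.Str.isIn "shoe" value || PySem.Str.isIn "boot" value then
      result.insert "clothing_type" "shoes"
    else if PySem.Str.isIn "pant" value || PySem.Str.isIn "trouser" value || PySem.Str.isIn "skirt" value then
      result.insert "clothing_type" "lower"
    else
      result.insert "clothing_type" "upper"
  else if PySem.Str.startswith line "DESCRIPTION:" then
    result.insert "description" (PySem.Str.strip (pvSplitVal line))
  else if PySem.Str.startswith line "FINE_DETAILS:" then
    result.insert "fine_details" (PySem.Str.strip (pvSplitVal line))
  else if PySem.Str.startswith line "STYLE:" then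
    result.insert "style" (PySem.Str.lower (PySem.Str.strip (pvSplitVal line)))
  else
    result

def parse_gpt_clothing_response_py (content : String) : Option (List (String × String)) :=
  let result0 : PySem.Dict String String :=
    ((((PySem.Dict.empty).insert "clothing_type" "").insert "description" "").insert "fine_details" "").insert "style" ""
  let result := (PySem.Str.splitlines content).foldl pvStepA result0
  if (result.getD "description" "") == "" then none
  else
    let result := if (result.getD "clothing_type" "") == "" then result.insert "clothing_type" "upper" else result
    let result :=
      if !(["casual", "formal", "athletic", "traditional", "vintage", "modern", "bohemian"].contains
            (result.getD "style" "")) then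
        result.insert "style" ""
      else result
    some result.items

-- ===== PORT B =====
-- phase 1 loop body: any colon line becomes raw[key] = value.strip() (last wins)
def pvStepB (raw : PySem.Dict String String) (rawLine : String) : PySem.Dict String String :=
  let line := PySem.Str.strip rawLine
  if PySem.Str.isIn ":" line then
    let parts := (PySem.Str.splitMax? line ":" 1).getD []
    raw.insert (parts.getD 0 "") (PySem.Str.strip (parts.getD 1 ""))
  else
    raw

def parse_gpt_clothing_response_py_alt (content : String) : Option (List (String × String)) :=
  let raw := (PySem.Str.splitlines content).foldl pvStepB PySem.Dict.empty
  let description := raw.getD "DESCRIPTION" ""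
  if description == "" then none
  else
    let clothing_type :=
      match raw.get? "CLOTHING_TYPE" with
      | none => "upper"
      | some ct =>
        let v := PySem.Str.lower ct
        if PySem.Str.isIn "shoe" v || PySem.Str.isIn "boot" v then "shoes"
        else if PySem.Str.isIn "pant" v || PySem.Str.isIn "trouser" v || PySem.Str.isIn "skirt" v then "lower"
        else "upper"
    let style0 := PySem.Str.lower (raw.getD "STYLE" "")
    let style :=
      if !(["casual", "formal", "athletic", "traditional", "vintage", "modern", "bohemian"].contains style0) then ""
      else style0
    some [("clothing_type", clothing_type), ("description", description),
          ("fine_details", raw.getD "FINE_DETAILS" ""), ("style", style)]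

-- ===== PRECONDITION & SPEC =====
def Spec_parse_gpt_clothing_response_py (content : String) (out : Option (List (String × String))) : Prop := out = parse_gpt_clothing_response_py_alt content
instance (content : String) (out : Option (List (String × String))) : Decidable (Spec_parse_gpt_clothing_response_py content out) := by unfold Spec_parse_gpt_clothing_response_py; infer_instance

-- ===== CLAIM (what is proved, stated in full; the proofs are below) =====
def Claim_equal_parse_gpt_clothing_response_py : Prop := ∀ (content : String), Dom_parse_gpt_clothing_response_py content → Spec_parse_gpt_clothing_response_py content (parse_gpt_clothing_response_py content)


-- ===== LEMMAS AND PROOFS =====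

-- proof-side view of A's result dict: always exactly the four keys, in order
def pvQuad (a b c d : String) : PySem.Dict String String :=
  ⟨[("clothing_type", a), ("description", b), ("fine_details", c), ("style", d)]⟩

def pvClassify (v : String) : String :=
  if PySem.Str.isIn "shoe" v || PySem.Str.isIn "boot" v then "shoes"
  else if PySem.Str.isIn "pant" v || PySem.Str.isIn "trouser" v || PySem.Str.isIn "skirt" v then "lower"
  else "upper"

def pvCT (r : PySem.Dict String String) : String :=
  match r.get? "CLOTHING_TYPE" with
  | none => ""
  | some u => pvClassify (PySem.Str.lower u)

def pvST (r : PySem.Dict String String) : String :=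
  match r.get? "STYLE" with
  | none => ""
  | some u => PySem.Str.lower u

def pvInterp (r : PySem.Dict String String) : PySem.Dict String String :=
  pvQuad (pvCT r) ((r.get? "DESCRIPTION").getD "") ((r.get? "FINE_DETAILS").getD "") (pvST r)

-- characterisation of s.split(":", 1) (PySem.Chars.splitOnMax.go with maxsplit 1)
lemma pv_go_zero (fuel : Nat) (l cur : List Char) (acc : List (List Char)) :
  PySem.Chars.splitOnMax.go [':'] fuel 0 l cur acc = ((cur.reverse ++ l) :: acc).reverse := by
  cases fuel with
  | zero => simp [PySem.Chars.splitOnMax.go]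
  | succ f => cases l <;> simp [PySem.Chars.splitOnMax.go]

lemma pv_go_colon (a : List Char) (h : ':' ∉ a) :
    ∀ (b : List Char) (fuel : Nat) (cur : List Char) (acc : List (List Char)),
    a.length + 1 + b.length ≤ fuel →
    PySem.Chars.splitOnMax.go [':'] fuel 1 (a ++ ':' :: b) cur acc = acc.reverse ++ [cur.reverse ++ a, b] := by
  induction a with
  | nil =>
    intro b fuel cur acc hf
    cases fuel with
    | zero => simp at hf
    | succ f =>
      simp only [List.nil_append, PySem.Chars.splitOnMax.go]
      rw [if_neg (by simp : ¬ ((1:Nat) = 0)), if_pos (by simp [List.isPrefixOf])]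
      rw [pv_go_zero]
      simp
  | cons c rest ih =>
    intro b fuel cur acc hf
    cases fuel with
    | zero => simp at hf
    | succ f =>
      have hc : c ≠ ':' := fun e => h (e ▸ List.mem_cons_self ..)
      have hrest : ':' ∉ rest := fun m => h (List.mem_cons_of_mem _ m)
      simp only [List.cons_append, PySem.Chars.splitOnMax.go]
      rw [if_neg (by simp : ¬ ((1:Nat) = 0)),
        if_neg (by simp [List.isPrefixOf]; exact fun e => absurd e.symm hc)]
      rw [ih hrest b f (c :: cur) acc (by simp at hf ⊢; omega)]
      simp

lemma pv_splitOnMax_colon (a b : List Char) (h : ':' ∉ a) :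
    PySem.Chars.splitOnMax (a ++ ':' :: b) [':'] 1 = [a, b] := by
  simp only [PySem.Chars.splitOnMax]
  rw [if_neg (by simp : ¬ ((1:Int) < 0)), show Int.toNat 1 = 1 from rfl]
  rw [pv_go_colon a h b _ [] [] (by simp; omega)]
  simp

lemma pv_splitMax_colon (l : String) (a b : List Char) (hl : l.toList = a ++ ':' :: b) (ha : ':' ∉ a) :
    PySem.Str.splitMax? l ":" 1 = some [String.ofList a, String.ofList b] := by
  have h := PySem.Str.splitMax?_map l ":" 1
  rw [show (":" : String).toList = [':'] by decide, hl] at h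
  rw [show PySem.Chars.splitMax? (a ++ ':' :: b) [':'] 1 = some (PySem.Chars.splitOnMax (a ++ ':' :: b) [':'] 1) from rfl,
    pv_splitOnMax_colon a b ha] at h
  cases e : PySem.Str.splitMax? l ":" 1 with
  | none => rw [e] at h; simp at h
  | some xs =>
    rw [e] at h
    simp only [Option.map_some, Option.some.injEq] at h
    match xs, h with
    | [x, y], h =>
      simp only [List.map_cons, List.map_nil, List.cons.injEq, and_true] at h
      obtain ⟨h1, h2⟩ := h
      rw [← h1, ← h2, String.ofList_toList, String.ofList_toList]

lemma pv_isIn_colon_true (l : String) (h : ':' ∈ l.toList) : PySem.Str.isIn ":" l = true := by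
  rw [PySem.Str.isIn_iff_infix]
  obtain ⟨s, t, e⟩ := List.append_of_mem h
  exact ⟨s, t, by rw [e]; simp [show (":" : String).toList = [':'] by decide]⟩

lemma pv_isIn_colon_false (l : String) (h : ':' ∉ l.toList) : PySem.Str.isIn ":" l = false := by
  cases e : PySem.Str.isIn ":" l with
  | false => rfl
  | true =>
    exfalso
    obtain ⟨s, t, ee⟩ := (PySem.Str.isIn_iff_infix _ _).mp e
    exact h (by rw [← ee]; simp [show (":" : String).toList = [':'] by decide])

-- the segment before the first colon is unique
lemma pv_first_colon_unique : ∀ (a k b t : List Char), ':' ∉ a → ':' ∉ k →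
    a ++ ':' :: b = k ++ ':' :: t → a = k := by
  intro a
  induction a with
  | nil =>
    intro k b t _ hk he
    cases k with
    | nil => rfl
    | cons c k' =>
      exfalso
      simp only [List.nil_append, List.cons_append, List.cons.injEq] at he
      exact hk (he.1 ▸ List.mem_cons_self ..)
  | cons c a' ih =>
    intro k b t ha hk he
    cases k with
    | nil =>
      exfalso
      simp only [List.cons_append, List.nil_append, List.cons.injEq] at he
      exact ha (he.1 ▸ List.mem_cons_self ..)
    | cons c' k' =>
      simp only [List.cons_append, List.cons.injEq] at he
      have := ih k' b t (fun m => ha (List.mem_cons_of_mem _ m)) (fun m => hk (List.mem_cons_of_mem _ m)) he.2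
      rw [he.1, this]

lemma pv_colon_decomp (l : List Char) (h : ':' ∈ l) :
    ∃ a b, l = a ++ ':' :: b ∧ ':' ∉ a := by
  induction l with
  | nil => simp at h
  | cons c rest ih =>
    by_cases hc : c = ':'
    · exact ⟨[], rest, by rw [hc]; rfl, by simp⟩
    · have hr : ':' ∈ rest := by
        rcases List.mem_cons.mp h with e | m
        · exact absurd e.symm hc
        · exact m
      obtain ⟨a, b, he, ha⟩ := ih hr
      exact ⟨c :: a, b, by rw [he]; rfl, by simp [ha]; exact fun e => hc e.symm⟩

lemma pv_sw_true (l p : String) (a b k : List Char) (hp : p.toList = k ++ [':'])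
    (hl : l.toList = a ++ ':' :: b) (hak : a = k) :
    PySem.Str.startswith l p = true := by
  rw [PySem.Str.startswith_eq, PySem.Chars.startswith_iff, hp, hl, hak]
  exact ⟨b, by simp⟩

lemma pv_sw_false (l p : String) (a b k : List Char) (hp : p.toList = k ++ [':'])
    (hk : ':' ∉ k) (hl : l.toList = a ++ ':' :: b) (ha : ':' ∉ a) (hak : a ≠ k) :
    PySem.Str.startswith l p = false := by
  cases e : PySem.Str.startswith l p with
  | false => rfl
  | true =>
    exfalso
    obtain ⟨t, ht⟩ := (PySem.Chars.startswith_iff _ _).mp (by rw [← PySem.Str.startswith_eq, e])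
    rw [hp, hl] at ht
    exact hak (pv_first_colon_unique a k b t ha hk (by rw [← ht]; simp))

lemma pv_sw_false_nocolon (l p : String) (hp : ':' ∈ p.toList) (h : ':' ∉ l.toList) :
    PySem.Str.startswith l p = false := by
  cases e : PySem.Str.startswith l p with
  | false => rfl
  | true =>
    exfalso
    obtain ⟨t, ht⟩ := (PySem.Chars.startswith_iff _ _).mp (by rw [← PySem.Str.startswith_eq, e])
    exact h (by rw [← ht]; exact List.mem_append_left _ hp)

-- inserting one of the four keys into the quad dict
lemma pvQuad_insert_ct (a b c d x : String) :
    (pvQuad a b c d).insert "clothing_type" x = pvQuad x b c d := by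
  apply PySem.Dict.ext
  simp [pvQuad, PySem.Dict.insert, PySem.Dict.contains]

lemma pvQuad_insert_de (a b c d x : String) :
    (pvQuad a b c d).insert "description" x = pvQuad a x c d := by
  apply PySem.Dict.ext
  simp [pvQuad, PySem.Dict.insert, PySem.Dict.contains]

lemma pvQuad_insert_fd (a b c d x : String) :
    (pvQuad a b c d).insert "fine_details" x = pvQuad a b x d := by
  apply PySem.Dict.ext
  simp [pvQuad, PySem.Dict.insert, PySem.Dict.contains]

lemma pvQuad_insert_st (a b c d x : String) :
    (pvQuad a b c d).insert "style" x = pvQuad a b c x := by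
  apply PySem.Dict.ext
  simp [pvQuad, PySem.Dict.insert, PySem.Dict.contains]

lemma pvQuad_get?_ct (a b c d : String) : (pvQuad a b c d).get? "clothing_type" = some a := by
  simp [pvQuad, PySem.Dict.get?]

lemma pvQuad_get?_de (a b c d : String) : (pvQuad a b c d).get? "description" = some b := by
  simp [pvQuad, PySem.Dict.get?]

lemma pvQuad_get?_st (a b c d : String) : (pvQuad a b c d).get? "style" = some d := by
  simp [pvQuad, PySem.Dict.get?]

lemma pv_classify_ne_empty (v : String) : (pvClassify v == "") = false := by
  unfold pvClassify
  split_ifs <;> decide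

-- interpreting an insert of one of the four recognised keys / of any other key
lemma pv_interp_insert_CT (r : PySem.Dict String String) (v : String) :
    pvInterp (r.insert "CLOTHING_TYPE" v) =
      pvQuad (pvClassify (PySem.Str.lower v)) ((r.get? "DESCRIPTION").getD "")
        ((r.get? "FINE_DETAILS").getD "") (pvST r) := by
  unfold pvInterp pvCT pvST
  rw [PySem.Dict.get?_insert_self,
    PySem.Dict.get?_insert_of_ne r v (by decide : ("DESCRIPTION" : String) ≠ "CLOTHING_TYPE"),
    PySem.Dict.get?_insert_of_ne r v (by decide : ("FINE_DETAILS" : String) ≠ "CLOTHING_TYPE"),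
    PySem.Dict.get?_insert_of_ne r v (by decide : ("STYLE" : String) ≠ "CLOTHING_TYPE")]

lemma pv_interp_insert_DE (r : PySem.Dict String String) (v : String) :
    pvInterp (r.insert "DESCRIPTION" v) =
      pvQuad (pvCT r) v ((r.get? "FINE_DETAILS").getD "") (pvST r) := by
  unfold pvInterp pvCT pvST
  rw [PySem.Dict.get?_insert_self,
    PySem.Dict.get?_insert_of_ne r v (by decide : ("CLOTHING_TYPE" : String) ≠ "DESCRIPTION"),
    PySem.Dict.get?_insert_of_ne r v (by decide : ("FINE_DETAILS" : String) ≠ "DESCRIPTION"),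
    PySem.Dict.get?_insert_of_ne r v (by decide : ("STYLE" : String) ≠ "DESCRIPTION")]
  rfl

lemma pv_interp_insert_FD (r : PySem.Dict String String) (v : String) :
    pvInterp (r.insert "FINE_DETAILS" v) =
      pvQuad (pvCT r) ((r.get? "DESCRIPTION").getD "") v (pvST r) := by
  unfold pvInterp pvCT pvST
  rw [PySem.Dict.get?_insert_self,
    PySem.Dict.get?_insert_of_ne r v (by decide : ("CLOTHING_TYPE" : String) ≠ "FINE_DETAILS"),
    PySem.Dict.get?_insert_of_ne r v (by decide : ("DESCRIPTION" : String) ≠ "FINE_DETAILS"),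
    PySem.Dict.get?_insert_of_ne r v (by decide : ("STYLE" : String) ≠ "FINE_DETAILS")]
  rfl

lemma pv_interp_insert_ST (r : PySem.Dict String String) (v : String) :
    pvInterp (r.insert "STYLE" v) =
      pvQuad (pvCT r) ((r.get? "DESCRIPTION").getD "") ((r.get? "FINE_DETAILS").getD "")
        (PySem.Str.lower v) := by
  unfold pvInterp pvCT pvST
  rw [PySem.Dict.get?_insert_self,
    PySem.Dict.get?_insert_of_ne r v (by decide : ("CLOTHING_TYPE" : String) ≠ "STYLE"),
    PySem.Dict.get?_insert_of_ne r v (by decide : ("DESCRIPTION" : String) ≠ "STYLE"),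
    PySem.Dict.get?_insert_of_ne r v (by decide : ("FINE_DETAILS" : String) ≠ "STYLE")]

lemma pv_interp_insert_other (r : PySem.Dict String String) (k v : String)
    (h1 : k ≠ "CLOTHING_TYPE") (h2 : k ≠ "DESCRIPTION") (h3 : k ≠ "FINE_DETAILS")
    (h4 : k ≠ "STYLE") : pvInterp (r.insert k v) = pvInterp r := by
  unfold pvInterp pvCT pvST
  rw [PySem.Dict.get?_insert_of_ne r v (fun e => h1 e.symm),
    PySem.Dict.get?_insert_of_ne r v (fun e => h2 e.symm),
    PySem.Dict.get?_insert_of_ne r v (fun e => h3 e.symm),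
    PySem.Dict.get?_insert_of_ne r v (fun e => h4 e.symm)]

-- one line: A's step on the interpreted dict = interpretation of B's step
lemma pv_step (r : PySem.Dict String String) (line : String) :
    pvStepA (pvInterp r) line = pvInterp (pvStepB r line) := by
  by_cases hc : ':' ∈ (PySem.Str.strip line).toList
  · obtain ⟨a, b, hl, ha⟩ := pv_colon_decomp _ hc
    have hsp := pv_splitMax_colon (PySem.Str.strip line) a b hl ha
    have hin := pv_isIn_colon_true (PySem.Str.strip line) hc
    by_cases h1 : a = ("CLOTHING_TYPE" : String).toList
    · simp only [pvStepA, pvStepB, pvSplitVal, hsp, hin,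
        pv_sw_true _ "CLOTHING_TYPE:" a b ("CLOTHING_TYPE" : String).toList (by decide) hl h1,
        if_true, Option.getD_some, List.getD, List.getElem?_cons_succ,
        List.getElem?_cons_zero]
      simp only [show String.ofList a = "CLOTHING_TYPE" by rw [h1, String.ofList_toList]]
      rw [pv_interp_insert_CT]
      unfold pvClassify pvInterp
      split_ifs <;> rw [pvQuad_insert_ct]
    · by_cases h2 : a = ("DESCRIPTION" : String).toList
      · simp only [pvStepA, pvStepB, pvSplitVal, hsp, hin,
          pv_sw_false _ "CLOTHING_TYPE:" a b ("CLOTHING_TYPE" : String).toList (by decide)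
            (by decide) hl ha h1,
          pv_sw_true _ "DESCRIPTION:" a b ("DESCRIPTION" : String).toList (by decide) hl h2,
          Bool.false_eq_true, if_false, if_true, Option.getD_some, List.getD, List.getElem?_cons_succ,
        List.getElem?_cons_zero]
        simp only [show String.ofList a = "DESCRIPTION" by rw [h2, String.ofList_toList]]
        rw [pv_interp_insert_DE, pvInterp, pvQuad_insert_de]
      · by_cases h3 : a = ("FINE_DETAILS" : String).toList
        · simp only [pvStepA, pvStepB, pvSplitVal, hsp, hin,
            pv_sw_false _ "CLOTHING_TYPE:" a b ("CLOTHING_TYPE" : String).toList (by decide)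
              (by decide) hl ha h1,
            pv_sw_false _ "DESCRIPTION:" a b ("DESCRIPTION" : String).toList (by decide)
              (by decide) hl ha h2,
            pv_sw_true _ "FINE_DETAILS:" a b ("FINE_DETAILS" : String).toList (by decide) hl h3,
            Bool.false_eq_true, if_false, if_true, Option.getD_some, List.getD, List.getElem?_cons_succ,
        List.getElem?_cons_zero]
          simp only [show String.ofList a = "FINE_DETAILS" by rw [h3, String.ofList_toList]]
          rw [pv_interp_insert_FD, pvInterp, pvQuad_insert_fd]
        · by_cases h4 : a = ("STYLE" : String).toList
          · simp only [pvStepA, pvStepB, pvSplitVal, hsp, hin,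
              pv_sw_false _ "CLOTHING_TYPE:" a b ("CLOTHING_TYPE" : String).toList (by decide)
                (by decide) hl ha h1,
              pv_sw_false _ "DESCRIPTION:" a b ("DESCRIPTION" : String).toList (by decide)
                (by decide) hl ha h2,
              pv_sw_false _ "FINE_DETAILS:" a b ("FINE_DETAILS" : String).toList (by decide)
                (by decide) hl ha h3,
              pv_sw_true _ "STYLE:" a b ("STYLE" : String).toList (by decide) hl h4,
              Bool.false_eq_true, if_false, if_true, Option.getD_some, List.getD, List.getElem?_cons_succ,
        List.getElem?_cons_zero]
            simp only [show String.ofList a = "STYLE" by rw [h4, String.ofList_toList]]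
            rw [pv_interp_insert_ST, pvInterp, pvQuad_insert_st]
          · have hka : ∀ (k : String), a ≠ k.toList → String.ofList a ≠ k := by
              intro k hak e
              exact hak (by rw [← e]; simp)
            simp only [pvStepA, pvStepB, pvSplitVal, hsp, hin,
              pv_sw_false _ "CLOTHING_TYPE:" a b ("CLOTHING_TYPE" : String).toList (by decide)
                (by decide) hl ha h1,
              pv_sw_false _ "DESCRIPTION:" a b ("DESCRIPTION" : String).toList (by decide)
                (by decide) hl ha h2,
              pv_sw_false _ "FINE_DETAILS:" a b ("FINE_DETAILS" : String).toList (by decide)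
                (by decide) hl ha h3,
              pv_sw_false _ "STYLE:" a b ("STYLE" : String).toList (by decide)
                (by decide) hl ha h4,
              Bool.false_eq_true, if_false, if_true, Option.getD_some, List.getD, List.getElem?_cons_succ,
        List.getElem?_cons_zero]
            rw [pv_interp_insert_other _ _ _ (hka _ h1) (hka _ h2) (hka _ h3) (hka _ h4)]
  · simp only [pvStepA, pvStepB, pvSplitVal,
      pv_sw_false_nocolon _ "CLOTHING_TYPE:" (by decide) hc,
      pv_sw_false_nocolon _ "DESCRIPTION:" (by decide) hc,
      pv_sw_false_nocolon _ "FINE_DETAILS:" (by decide) hc,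
      pv_sw_false_nocolon _ "STYLE:" (by decide) hc,
      pv_isIn_colon_false _ hc, Bool.false_eq_true, if_false]

lemma pv_loop (ls : List String) : ∀ (r : PySem.Dict String String),
    ls.foldl pvStepA (pvInterp r) = pvInterp (ls.foldl pvStepB r) := by
  induction ls with
  | nil => intro r; rfl
  | cons x xs ih =>
    intro r
    simp only [List.foldl_cons, pv_step r x]
    exact ih (pvStepB r x)

lemma pv_st_eq (r : PySem.Dict String String) :
    pvST r = PySem.Str.lower ((r.get? "STYLE").getD "") := by
  rw [pvST]
  cases r.get? "STYLE" with
  | none => decide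
  | some u => rfl

-- ===== VERDICT (by name: the statement is the Claim_ definition above) =====
theorem parse_gpt_clothing_response_py_spec : Claim_equal_parse_gpt_clothing_response_py := by
  intro content _
  show parse_gpt_clothing_response_py content = parse_gpt_clothing_response_py_alt content
  simp only [parse_gpt_clothing_response_py, parse_gpt_clothing_response_py_alt]
  rw [show ((((PySem.Dict.empty : PySem.Dict String String).insert "clothing_type" "").insert
        "description" "").insert "fine_details" "").insert "style" "" = pvInterp PySem.Dict.empty by decide]
  rw [pv_loop]
  generalize (PySem.Str.splitlines content).foldl pvStepB PySem.Dict.empty = r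
  simp only [pvInterp, PySem.Dict.getD_eq_get?_getD, pvQuad_get?_ct, pvQuad_get?_de,
    Option.getD_some, pv_st_eq]
  by_cases hde : (((r.get? "DESCRIPTION").getD "" : String) == "") = true
  · simp only [hde, if_true]
  · simp only [hde, Bool.false_eq_true, if_false]
    cases hct : r.get? "CLOTHING_TYPE" with
    | none =>
      simp only [pvCT, hct, pvQuad_insert_ct, pvQuad_get?_st, Option.getD_some,
        beq_self_eq_true, if_true]
      by_cases hst : (["casual", "formal", "athletic", "traditional", "vintage", "modern",
          "bohemian"].contains (PySem.Str.lower ((r.get? "STYLE").getD ""))) = true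
      · simp only [hst, Bool.not_true, Bool.false_eq_true, if_false]
        simp [pvQuad]
      · simp only [hst, Bool.not_false, if_true, pvQuad_insert_st]
        simp [pvQuad]
    | some u =>
      simp only [pvCT, hct, pvQuad_get?_st, Option.getD_some, pv_classify_ne_empty,
        Bool.false_eq_true, if_false]
      by_cases hst : (["casual", "formal", "athletic", "traditional", "vintage", "modern",
          "bohemian"].contains (PySem.Str.lower ((r.get? "STYLE").getD ""))) = true
      · simp only [hst, Bool.not_true, Bool.false_eq_true, if_false]
        simp [pvQuad, pvClassify]
      · simp only [hst, Bool.not_false, if_true, pvQuad_insert_st]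
        simp [pvQuad, pvClassify]
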